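-- pv_equiv track=rewrite | github.com/xyjk0511/tomatis-audio-processor | src/verify_tomatis_15db_v2.py | find_stable_frames
-- ===== SOURCE A (Python) =====
-- def find_stable_frames(states, margin=2):
--     """找到稳定帧"""
--     n = len(states)
--     c1_stable = []
--     c2_stable = []
--
--     for i in range(margin, n - margin):
--         window = states[i - margin:i + margin + 1]
--         if all(s == 'C1' for s in window):
--             c1_stable.append(i)
--         elif all(s == 'C2' for s in window):
--             c2_stable.append(i)
--
--     return c1_stable, c2_stable
-- ===== SOURCE B (Python) =====
-- def find_stable_frames(states, margin=2):
--     """找到稳定帧"""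
--     n = len(states)
--     if n - margin <= margin:
--         return [], []
--     p1 = [0] * (n + 1)
--     p2 = [0] * (n + 1)
--     for i, s in enumerate(states):
--         p1[i + 1] = p1[i] + (s == 'C1')
--         p2[i + 1] = p2[i] + (s == 'C2')
--     w = 2 * margin + 1
--     c1_stable = []
--     c2_stable = []
--     for i in range(margin, n - margin):
--         if p1[i + margin + 1] - p1[i - margin] == w:
--             c1_stable.append(i)
--         elif p2[i + margin + 1] - p2[i - margin] == w:
--             c2_stable.append(i)
--     return c1_stable, c2_stable
-- ===== Notes on version B (the rewrite author's own statement) =====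
-- stated objective: alternative
-- what changed: B precomputes prefix-count tables of 'C1' and 'C2' once and decides each index by a prefix-difference comparison against the window length, instead of re-scanning the 2*margin+1 window slice at every index.
-- outside the precondition, e.g. on find_stable_frames(['C1'], -1): A returns ([-1, 0, 1], []), B raises IndexError
import Mathlib
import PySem

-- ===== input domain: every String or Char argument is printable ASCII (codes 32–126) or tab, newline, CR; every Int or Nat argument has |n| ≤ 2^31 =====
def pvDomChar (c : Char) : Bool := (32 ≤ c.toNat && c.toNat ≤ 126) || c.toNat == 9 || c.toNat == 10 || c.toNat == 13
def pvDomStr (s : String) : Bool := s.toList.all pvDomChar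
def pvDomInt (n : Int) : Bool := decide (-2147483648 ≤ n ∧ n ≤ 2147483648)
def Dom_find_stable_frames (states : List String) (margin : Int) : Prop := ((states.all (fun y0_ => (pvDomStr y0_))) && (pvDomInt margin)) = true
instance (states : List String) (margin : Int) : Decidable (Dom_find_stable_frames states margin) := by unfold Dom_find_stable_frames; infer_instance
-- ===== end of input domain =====

-- B replaces the per-index window re-scan by two prefix-count tables (counts of
-- 'C1'/'C2' among the first k states): the window is all-'C1' iff its C1
-- prefix-count difference equals the window length 2*margin+1.

-- ===== PORT A =====
def find_stable_frames (states : List String) (margin : Int) : List Int × List Int :=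
  let n : Int := states.length
  (PySem.List.pyRange margin (n - margin) 1).foldl
    (fun (acc : List Int × List Int) i =>
      let window := PySem.List.slice states (some (i - margin)) (some (i + margin + 1))
      if window.all (fun s => s == "C1") then (acc.1 ++ [i], acc.2)
      else if window.all (fun s => s == "C2") then (acc.1, acc.2 ++ [i])
      else acc)
    ([], [])

-- ===== PORT B =====
def find_stable_frames_alt (states : List String) (margin : Int) : List Int × List Int :=
  let n : Int := states.length
  if n - margin ≤ margin then ([], []) else
  -- prefix tables: p1/p2[k] = number of 'C1'/'C2' among the first k states
  let p1 : List Int := states.scanl (fun a s => a + (if s == "C1" then 1 else 0)) 0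
  let p2 : List Int := states.scanl (fun a s => a + (if s == "C2" then 1 else 0)) 0
  let w : Int := 2 * margin + 1
  (PySem.List.pyRange margin (n - margin) 1).foldl
    (fun (acc : List Int × List Int) i =>
      if PySem.List.pyGetD p1 (i + margin + 1) 0 - PySem.List.pyGetD p1 (i - margin) 0 == w
        then (acc.1 ++ [i], acc.2)
      else if PySem.List.pyGetD p2 (i + margin + 1) 0 - PySem.List.pyGetD p2 (i - margin) 0 == w
        then (acc.1, acc.2 ++ [i])
      else acc)
    ([], [])

-- ===== PRECONDITION & SPEC =====
-- Pre_ excludes negative margin, which is outside the task's natural domain: there A's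
-- empty slice makes all() vacuously true and A returns accidental indices, while B's
-- prefix-table lookup raises IndexError.
def Pre_find_stable_frames (states : List String) (margin : Int) : Prop := 0 ≤ margin
instance (states : List String) (margin : Int) : Decidable (Pre_find_stable_frames states margin) := by unfold Pre_find_stable_frames; infer_instance
def pvWitness_find_stable_frames : List String × Int := (["C1", "C1", "C1", "C2"], 1)
def Spec_find_stable_frames (states : List String) (margin : Int) (out : List Int × List Int) : Prop := out = find_stable_frames_alt states margin
instance (states : List String) (margin : Int) (out : List Int × List Int) : Decidable (Spec_find_stable_frames states margin out) := by unfold Spec_find_stable_frames; infer_instance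

-- ===== CLAIM (what is proved, stated in full; the proofs are below) =====
def Claim_equal_find_stable_frames : Prop := ∀ (states : List String) (margin : Int), Dom_find_stable_frames states margin → Pre_find_stable_frames states margin → Spec_find_stable_frames states margin (find_stable_frames states margin)

-- ===== LEMMAS AND PROOFS =====

-- the scanl prefix table read at k is the count over the first k elements
lemma scanl_count_getD (g : String → Bool) (xs : List String) (acc : Int) (k : Nat)
    (hk : k ≤ xs.length) :
    (xs.scanl (fun a s => a + (if g s then (1:Int) else 0)) acc).getD k 0
      = acc + ((xs.take k).countP g : Int) := by
  induction xs generalizing acc k with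
  | nil =>
    have hk0 : k = 0 := by simpa using hk
    subst hk0; simp
  | cons x xs ih =>
    cases k with
    | zero => simp [List.scanl]
    | succ k =>
      simp only [List.scanl_cons, List.getD_cons_succ, List.take_succ_cons, List.countP_cons]
      rw [ih _ k (by simpa using hk)]
      by_cases h : g x <;> simp [h] <;> omega

-- all-equal over a window ↔ the prefix-count difference equals the window length
lemma window_all_iff_count (g : String → Bool) (xs : List String) (a b : Nat)
    (hab : a ≤ b) (hb : b ≤ xs.length) :
    (((xs.drop a).take (b - a)).all g = true)
      ↔ ((xs.take b).countP g : Int) - ((xs.take a).countP g : Int) = (b : Int) - (a : Int) := by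
  have hsplit : xs.take b = xs.take a ++ (xs.drop a).take (b - a) := by
    have hb' : b = a + (b - a) := by omega
    conv_lhs => rw [hb', List.take_add]
  have hlen : ((xs.drop a).take (b - a)).length = b - a := by
    simp
    omega
  rw [hsplit, List.countP_append]
  have hle := List.countP_le_length (p := g) (l := (xs.drop a).take (b - a))
  rw [List.all_eq_true]
  constructor
  · intro h
    have : ((xs.drop a).take (b - a)).countP g = b - a := by
      rw [List.countP_eq_length.2 h, hlen]
    omega
  · intro h
    have : ((xs.drop a).take (b - a)).countP g = ((xs.drop a).take (b - a)).length := by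
      omega
    exact List.countP_eq_length.1 this

-- the two fold bodies agree on every index of the range
lemma body_eq (states : List String) (margin : Int) (hm : 0 ≤ margin)
    (i : Int) (hi : i ∈ PySem.List.pyRange margin ((states.length : Int) - margin) 1)
    (acc : List Int × List Int) :
    (let window := PySem.List.slice states (some (i - margin)) (some (i + margin + 1))
     if window.all (fun s => s == "C1") then (acc.1 ++ [i], acc.2)
     else if window.all (fun s => s == "C2") then (acc.1, acc.2 ++ [i])
     else acc)
    =
    (if PySem.List.pyGetD (states.scanl (fun a s => a + (if s == "C1" then (1:Int) else 0)) 0) (i + margin + 1) 0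
        - PySem.List.pyGetD (states.scanl (fun a s => a + (if s == "C1" then (1:Int) else 0)) 0) (i - margin) 0 == 2 * margin + 1
       then (acc.1 ++ [i], acc.2)
     else if PySem.List.pyGetD (states.scanl (fun a s => a + (if s == "C2" then (1:Int) else 0)) 0) (i + margin + 1) 0
        - PySem.List.pyGetD (states.scanl (fun a s => a + (if s == "C2" then (1:Int) else 0)) 0) (i - margin) 0 == 2 * margin + 1
       then (acc.1, acc.2 ++ [i])
     else acc) := by
  rw [PySem.List.mem_pyRange_one] at hi
  obtain ⟨h1, h2⟩ := hi
  set a : Nat := (i - margin).toNat with ha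
  set b : Nat := (i + margin + 1).toNat with hb
  have hia : i - margin = (a : Int) := by omega
  have hib : i + margin + 1 = (b : Int) := by omega
  have hab : a ≤ b := by omega
  have hbl : b ≤ states.length := by omega
  have hwin : PySem.List.slice states (some (i - margin)) (some (i + margin + 1))
      = (states.drop a).take (b - a) := by
    rw [PySem.List.slice_toNat _ (by omega) (by omega)]
  have key : ∀ g : String → Bool,
      (((states.drop a).take (b - a)).all g
        = (PySem.List.pyGetD (states.scanl (fun acc' s => acc' + (if g s then (1:Int) else 0)) 0) (i + margin + 1) 0
            - PySem.List.pyGetD (states.scanl (fun acc' s => acc' + (if g s then (1:Int) else 0)) 0) (i - margin) 0 == 2 * margin + 1)) := by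
    intro g
    rw [hia, hib, PySem.List.pyGetD_natCast, PySem.List.pyGetD_natCast,
        scanl_count_getD g states 0 a (by omega),
        scanl_count_getD g states 0 b (by simpa using hbl)]
    have hiff := window_all_iff_count g states a b hab hbl
    by_cases hc : (0:Int) + ((states.take b).countP g : Int)
        - (0 + ((states.take a).countP g : Int)) = 2 * margin + 1
    · rw [hc]
      simp only [beq_self_eq_true]
      exact hiff.mpr (by omega)
    · rw [beq_eq_false_iff_ne.mpr hc]
      rcases Bool.eq_false_or_eq_true (((states.drop a).take (b - a)).all g) with h | h
      · exact absurd (hiff.mp h) (by omega)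
      · exact h
  simp only [hwin]
  rw [key (fun s => s == "C1"), key (fun s => s == "C2")]

-- ===== VERDICT (by name: the statement is the Claim_ definition above) =====
theorem find_stable_frames_spec : Claim_equal_find_stable_frames := by
  intro states margin _hdom hm
  unfold Spec_find_stable_frames find_stable_frames find_stable_frames_alt
  simp only []
  by_cases hg : (states.length : Int) - margin ≤ margin
  · rw [if_pos hg]
    have hempty : PySem.List.pyRange margin ((states.length : Int) - margin) 1 = [] := by
      rw [List.eq_nil_iff_forall_not_mem]
      intro x hx
      rw [PySem.List.mem_pyRange_one] at hx
      omega
    rw [hempty]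
    rfl
  · rw [if_neg hg]
    apply PySem.List.foldl_congr_mem
    intro acc i hi
    exact body_eq states margin hm i hi acc
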